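-- pv_equiv track=rewrite | github.com/shane9coy/Oracle-Hermes | skills/oracle/scripts/oracle_render.py | calculate_element_balance
-- ===== SOURCE A (Python) =====
-- from typing import Any
--
-- ELEMENT_OF_SIGN = {
--     "aries": "fire", "leo": "fire", "sagittarius": "fire",
--     "taurus": "earth", "virgo": "earth", "capricorn": "earth",
--     "gemini": "air", "libra": "air", "aquarius": "air",
--     "cancer": "water", "scorpio": "water", "pisces": "water",
-- }
--
-- def calculate_element_balance(planets: list[dict[str, Any]]) -> dict[str, int]:
--     """Calculate element distribution in the chart."""
--     counts = {"fire": 0, "earth": 0, "air": 0, "water": 0}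
--     for planet in planets:
--         sign = (planet.get("sign") or "").lower()
--         elem = ELEMENT_OF_SIGN.get(sign)
--         if elem:
--             counts[elem] += 1
--     return counts
-- ===== SOURCE B (Python) =====
-- ELEMENT_OF_SIGN = {
--     "aries": "fire", "leo": "fire", "sagittarius": "fire",
--     "taurus": "earth", "virgo": "earth", "capricorn": "earth",
--     "gemini": "air", "libra": "air", "aquarius": "air",
--     "cancer": "water", "scorpio": "water", "pisces": "water",
-- }
--
-- def _planet_element(planet):
--     return ELEMENT_OF_SIGN.get((planet.get("sign") or "").lower())
--
-- def calculate_element_balance(planets):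
--     """Calculate element distribution in the chart."""
--     return {
--         elem: sum(1 for p in planets if _planet_element(p) == elem)
--         for elem in ("fire", "earth", "air", "water")
--     }
-- ===== Notes on version B (the rewrite author's own statement) =====
-- stated objective: alternative
-- what changed: Replaces the single accumulating pass that mutates a counts dict with a dict comprehension over the four fixed element names, each counting its planets with sum(...); group-by-output-key with four scans instead of one stateful pass.
import Mathlib
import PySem

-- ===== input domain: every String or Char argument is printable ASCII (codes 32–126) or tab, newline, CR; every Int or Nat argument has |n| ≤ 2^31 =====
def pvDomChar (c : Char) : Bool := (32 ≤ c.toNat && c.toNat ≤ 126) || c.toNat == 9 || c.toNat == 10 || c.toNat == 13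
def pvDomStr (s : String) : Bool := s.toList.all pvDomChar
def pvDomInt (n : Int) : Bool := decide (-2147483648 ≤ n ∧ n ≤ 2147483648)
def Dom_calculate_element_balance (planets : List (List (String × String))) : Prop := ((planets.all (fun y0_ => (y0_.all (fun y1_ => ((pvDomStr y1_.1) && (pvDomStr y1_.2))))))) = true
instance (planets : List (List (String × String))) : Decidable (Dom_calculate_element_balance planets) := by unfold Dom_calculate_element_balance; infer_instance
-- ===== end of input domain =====

-- B replaces A's single accumulating pass over a mutable counts dict with a
-- comprehension over the four fixed element names, each counting its planets
-- (alternative decomposition, same cost).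

-- shared module constant
def ELEMENT_OF_SIGN : PySem.Dict String String := PySem.Dict.mk [
  ("aries", "fire"), ("leo", "fire"), ("sagittarius", "fire"),
  ("taurus", "earth"), ("virgo", "earth"), ("capricorn", "earth"),
  ("gemini", "air"), ("libra", "air"), ("aquarius", "air"),
  ("cancer", "water"), ("scorpio", "water"), ("pisces", "water")]

-- ===== PORT A =====
def calculate_element_balance (planets : List (List (String × String))) : List (String × Int) :=
  (planets.foldl (fun counts planet =>
    let sign := PySem.Str.lower (((PySem.Dict.mk planet).get? "sign").getD "")
    let elem := ELEMENT_OF_SIGN.get? sign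
    match elem with
    | some e => if e == "" then counts else counts.modify e 0 (· + 1)
    | none => counts)
    (PySem.Dict.mk [("fire", 0), ("earth", 0), ("air", 0), ("water", 0)])).items

-- ===== PORT B =====
def pvPlanetElem (planet : List (String × String)) : Option String :=
  ELEMENT_OF_SIGN.get? (PySem.Str.lower (((PySem.Dict.mk planet).get? "sign").getD ""))

def calculate_element_balance_alt (planets : List (List (String × String))) : List (String × Int) :=
  ["fire", "earth", "air", "water"].map (fun elem =>
    (elem, ((planets.countP (fun p => pvPlanetElem p == some elem)) : Int)))

-- ===== PRECONDITION & SPEC =====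
def Spec_calculate_element_balance (planets : List (List (String × String))) (out : List (String × Int)) : Prop := out = calculate_element_balance_alt planets
instance (planets : List (List (String × String))) (out : List (String × Int)) : Decidable (Spec_calculate_element_balance planets out) := by unfold Spec_calculate_element_balance; infer_instance

-- ===== CLAIM (what is proved, stated in full; the proofs are below) =====
def Claim_equal_calculate_element_balance : Prop := ∀ (planets : List (List (String × String))), Dom_calculate_element_balance planets → Spec_calculate_element_balance planets (calculate_element_balance planets)

-- ===== LEMMAS AND PROOFS =====

-- every value looked up in ELEMENT_OF_SIGN is one of the four element names
lemma elem_mem_four (s e : String) (h : ELEMENT_OF_SIGN.get? s = some e) :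
    e ∈ (["fire", "earth", "air", "water"] : List String) := by
  have hm := PySem.Dict.mem_items_of_get?_eq_some _ h
  simp [ELEMENT_OF_SIGN, PySem.Dict.items] at hm
  rcases hm with ⟨_, he⟩ | ⟨_, he⟩ | ⟨_, he⟩ | ⟨_, he⟩ | ⟨_, he⟩ | ⟨_, he⟩ |
    ⟨_, he⟩ | ⟨_, he⟩ | ⟨_, he⟩ | ⟨_, he⟩ | ⟨_, he⟩ | ⟨_, he⟩ <;> simp [he]

def pvStep (counts : PySem.Dict String Int) (planet : List (String × String)) :
    PySem.Dict String Int :=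
  match pvPlanetElem planet with
  | some e => if e == "" then counts else counts.modify e 0 (· + 1)
  | none => counts

lemma fold_keys (l : List (List (String × String))) (d : PySem.Dict String Int)
    (hk : ∀ e ∈ (["fire", "earth", "air", "water"] : List String), d.contains e = true) :
    (l.foldl pvStep d).keys = d.keys ∧
    (∀ e ∈ (["fire", "earth", "air", "water"] : List String), (l.foldl pvStep d).contains e = true) := by
  induction l generalizing d with
  | nil => exact ⟨rfl, hk⟩
  | cons p t ih =>
    have hstep : (pvStep d p).keys = d.keys ∧
        (∀ e ∈ (["fire", "earth", "air", "water"] : List String), (pvStep d p).contains e = true) := by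
      unfold pvStep
      cases hg : pvPlanetElem p with
      | none => exact ⟨rfl, hk⟩
      | some e =>
        dsimp only
        have he4 := elem_mem_four _ _ hg
        have hce := hk e he4
        have he : (e == "") = false := by
          fin_cases he4 <;> decide
        rw [if_neg (by simp [he])]
        refine ⟨by simp [PySem.Dict.keys_modify, PySem.Dict.keys_insert_of_contains, hce], ?_⟩
        intro e' he'
        simp [PySem.Dict.contains_modify, hk e' he']
    have := ih (pvStep d p) hstep.2
    simp only [List.foldl_cons]
    exact ⟨this.1.trans hstep.1, this.2⟩

lemma fold_getD (l : List (List (String × String))) (d : PySem.Dict String Int)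
    (k : String) (hk : k ≠ "") :
    (l.foldl pvStep d).getD k 0 = d.getD k 0 + (l.countP (fun p => pvPlanetElem p == some k) : Int) := by
  induction l generalizing d with
  | nil => simp
  | cons p t ih =>
    simp only [List.foldl_cons, List.countP_cons]
    rw [ih]
    unfold pvStep
    cases hg : pvPlanetElem p with
    | none => simp [hg]
    | some e =>
      dsimp only
      by_cases hek : e = k
      · subst hek
        rw [if_neg (by simp [hk])]
        rw [PySem.Dict.getD_modify_self]
        simp only [beq_self_eq_true, if_pos rfl]
        push_cast
        ring
      · have hck : (some e == some k) = false := by simp [hek]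
        by_cases he0 : e = ""
        · rw [if_pos (by simp [he0])]
          simp [hck]
        · rw [if_neg (by simp [he0]), PySem.Dict.getD_modify,
              if_neg (show ¬ k = e from fun h => hek h.symm)]
          simp [hck]

-- ===== VERDICT (by name: the statement is the Claim_ definition above) =====
theorem calculate_element_balance_spec : Claim_equal_calculate_element_balance := by
  intro planets _
  unfold Spec_calculate_element_balance calculate_element_balance calculate_element_balance_alt
  set d0 : PySem.Dict String Int := PySem.Dict.mk [("fire", 0), ("earth", 0), ("air", 0), ("water", 0)] with hd0
  have hstep : (fun counts planet =>
      let sign := PySem.Str.lower (((PySem.Dict.mk planet).get? "sign").getD "")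
      let elem := ELEMENT_OF_SIGN.get? sign
      match elem with
      | some e => if e == "" then counts else counts.modify e 0 (· + 1)
      | none => counts) = pvStep := rfl
  rw [hstep]
  have hk0 : ∀ e ∈ (["fire", "earth", "air", "water"] : List String), d0.contains e = true := by decide
  have hkeys := (fold_keys planets d0 hk0).1
  have hnd : (planets.foldl pvStep d0).keys.Nodup := by
    rw [hkeys]; decide
  rw [PySem.Dict.items_eq_map_keys _ hnd 0, hkeys]
  have hks : d0.keys = ["fire", "earth", "air", "water"] := by decide
  rw [hks]
  simp only [List.map]
  have hf := fold_getD planets d0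
  rw [hf "fire" (by decide), hf "earth" (by decide), hf "air" (by decide), hf "water" (by decide)]
  have z1 : d0.getD "fire" 0 = 0 := by decide
  have z2 : d0.getD "earth" 0 = 0 := by decide
  have z3 : d0.getD "air" 0 = 0 := by decide
  have z4 : d0.getD "water" 0 = 0 := by decide
  rw [z1, z2, z3, z4]
  simp
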